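-- pv_equiv track=rewrite | github.com/pkolomiy/UNIT_Factory | N-puzzle/Heuristics/Manhattan.py | distance_map
-- ===== SOURCE A (Python) =====
-- def distance_map(size):
--     dist_map = {}
--     for k in range(size):
--         for l in range(size):
--             dist_map[(k * size) + l] = [
--                 abs(i - k) + abs(j - l)
--                 for i in range(size)
--                 for j in range(size)
--             ]
--     return dist_map
-- ===== SOURCE B (Python) =====
-- def distance_map(size):
--     # Breadth-first search, run once, over the (2*size-1)x(2*size-1) grid of
--     # relative offsets from its centre cell; every cell's distance list is then
--     # assembled from rows of that BFS field by slicing.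
--     if size < 1:
--         return {}
--     m = 2 * size - 1
--     field = [-1] * (m * m)
--     centre = (size - 1) * m + (size - 1)
--     field[centre] = 0
--     frontier = [centre]
--     for d in range(1, 2 * size - 1):
--         nxt = []
--         for c in frontier:
--             i, j = divmod(c, m)
--             for ni, nj in ((i - 1, j), (i + 1, j), (i, j - 1), (i, j + 1)):
--                 if 0 <= ni < m and 0 <= nj < m:
--                     nb = ni * m + nj
--                     if field[nb] == -1:
--                         field[nb] = d
--                         nxt.append(nb)
--         frontier = nxt
--     out = {}
--     for k in range(size):
--         for l in range(size):
--             row = []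
--             for i in range(size):
--                 base = (i - k + size - 1) * m + (size - 1 - l)
--                 row += field[base : base + size]
--             out[k * size + l] = row
--     return out
-- ===== Notes on version B (the rewrite author's own statement) =====
-- stated objective: alternative
-- what changed: B runs a single breadth-first search over the (2*size-1)^2 grid of relative offsets from its centre (frontier expansion into a flat visited/distance array) and assembles every cell's distance list from rows of that BFS field by list slicing, instead of evaluating the closed-form |i-k|+|j-l| arithmetic for each of the size^4 cell pairs; intended as faster and measured ~2.7-3x at the largest sizes both complete, though one timing run could not confirm it at sizes where A times out.
import Mathlib
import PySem

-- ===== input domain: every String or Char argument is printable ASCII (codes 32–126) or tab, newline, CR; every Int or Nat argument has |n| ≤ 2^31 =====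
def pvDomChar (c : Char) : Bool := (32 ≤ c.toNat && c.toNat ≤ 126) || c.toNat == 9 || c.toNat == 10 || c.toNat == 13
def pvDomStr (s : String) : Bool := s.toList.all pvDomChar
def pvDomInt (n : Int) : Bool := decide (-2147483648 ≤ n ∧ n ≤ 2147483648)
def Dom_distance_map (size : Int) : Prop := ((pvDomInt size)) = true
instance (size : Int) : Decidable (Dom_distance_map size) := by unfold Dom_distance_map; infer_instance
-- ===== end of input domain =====

-- B replaces A's per-cell |i-k|+|j-l| arithmetic by one breadth-first search of the
-- 4-connected offset grid, from which every cell's distance list is assembled by row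
-- slicing (objective: alternative; same return value).

-- ===== PORT A =====
def distance_map (size : Int) : List (Int × List Int) :=
  ((PySem.List.pyRange 0 size 1).foldl (fun d k =>
    (PySem.List.pyRange 0 size 1).foldl (fun d l =>
      d.insert (k * size + l)
        ((PySem.List.pyRange 0 size 1).flatMap (fun i =>
          (PySem.List.pyRange 0 size 1).map (fun j => |i - k| + |j - l|)))) d)
    (PySem.Dict.empty : PySem.Dict Int (List Int))).items

-- ===== PORT B =====
-- the four orthogonal neighbour coordinates tried in Python's tuple order
def pvNbrs (i j : Int) : List (Int × Int) := [(i - 1, j), (i + 1, j), (i, j - 1), (i, j + 1)]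

-- body of the innermost 'for ni, nj in …' iteration: bounds check, unvisited check, write + enqueue
def pvVisit (size d : Int) (st : List Int × List Int) (p : Int × Int) : List Int × List Int :=
  if 0 ≤ p.1 ∧ p.1 < size ∧ 0 ≤ p.2 ∧ p.2 < size then
    if PySem.List.pyGetD st.1 (p.1 * size + p.2) 0 = -1 then
      (PySem.List.pySetD st.1 (p.1 * size + p.2) d, st.2 ++ [p.1 * size + p.2])
    else st
  else st

-- one frontier cell c processed: i, j = divmod(c, size); visit the four neighbours
def bfsStep (size d : Int) (st : List Int × List Int) (c : Int) : List Int × List Int :=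
  (pvNbrs (PySem.Int.floordiv c size) (PySem.Int.mod c size)).foldl (pvVisit size d) st

-- the 'for d in range(1, 2*size - 1)' level loop on the grid of side m; state = (dist, frontier)
def bfsLevels (m hi : Int) (st0 : List Int × List Int) : List Int × List Int :=
  (PySem.List.pyRange 1 hi 1).foldl
    (fun st d => st.2.foldl (bfsStep m d) (st.1, [])) st0

def distance_map_alt (size : Int) : List (Int × List Int) :=
  -- if size < 1: return {}   (degenerate grids: no BFS field is built)
  if size < 1 then (PySem.Dict.empty : PySem.Dict Int (List Int)).items else
  -- m = 2*size - 1; field = [-1]*(m*m); field[centre] = 0; frontier = [centre]; BFS levels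
  let m := 2 * size - 1
  let centre := (size - 1) * m + (size - 1)
  let field := (bfsLevels m (2 * size - 1)
    (PySem.List.pySetD (List.replicate (m * m).toNat (-1 : Int)) centre 0, [centre])).1
  ((PySem.List.pyRange 0 size 1).foldl (fun out k =>
    (PySem.List.pyRange 0 size 1).foldl (fun out l =>
      -- row = []; for i: row += field[base : base + size]
      out.insert (k * size + l)
        ((PySem.List.pyRange 0 size 1).foldl (fun row i =>
          row ++ PySem.List.slice field
            (some ((i - k + size - 1) * m + (size - 1 - l)))
            (some ((i - k + size - 1) * m + (size - 1 - l) + size))) [])) out)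
    (PySem.Dict.empty : PySem.Dict Int (List Int))).items

-- ===== PRECONDITION & SPEC =====
def Spec_distance_map (size : Int) (out : List (Int × List Int)) : Prop := out = distance_map_alt size
instance (size : Int) (out : List (Int × List Int)) : Decidable (Spec_distance_map size out) := by unfold Spec_distance_map; infer_instance

-- ===== CLAIM (what is proved, stated in full; the proofs are below) =====
def Claim_equal_distance_map : Prop := ∀ (size : Int), Dom_distance_map size → Spec_distance_map size (distance_map size)

-- ===== LEMMAS AND PROOFS =====

-- Manhattan distance from source (k,l) to the cell with flat index t, on the s×s grid
def pvM (s k l t : Nat) : Int := |((t / s : Nat) : Int) - (k : Int)| + |((t % s : Nat) : Int) - (l : Int)|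

-- invariant of the inner fold over the frontier while writing level value d:
-- dist is final below d, writes-so-far are exactly the enqueued cells (value d), rest -1
def pvJ (s k l : Nat) (d : Int) (st : List Int × List Int) : Prop :=
  st.1.length = s * s ∧
  (∀ t : Nat, t < s * s →
    st.1[t]? = some (if pvM s k l t ≤ d - 1 then pvM s k l t
                     else if (t : Int) ∈ st.2 then d else -1)) ∧
  (∀ x ∈ st.2, ∃ t : Nat, t < s * s ∧ x = (t : Int) ∧ pvM s k l t = d)

-- state of dist between levels: final below level d, -1 above
def pvPhi (s k l : Nat) (d : Int) (dist : List Int) : Prop :=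
  dist.length = s * s ∧
  ∀ t : Nat, t < s * s → dist[t]? = some (if pvM s k l t ≤ d then pvM s k l t else -1)


-- ----- arithmetic helpers -----

lemma pv_abs_sub_one (x : Int) : |x - 1| - |x| = 1 ∨ |x - 1| - |x| = -1 := by
  rcases le_or_gt 1 x with h | h
  · right; rw [abs_of_nonneg (by omega), abs_of_nonneg (by omega)]; ring
  · left; rw [abs_of_nonpos (show x - 1 ≤ 0 by omega), abs_of_nonpos (show x ≤ 0 by omega)]; ring

lemma pv_abs_add_one (x : Int) : |x + 1| - |x| = 1 ∨ |x + 1| - |x| = -1 := by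
  rcases le_or_gt 0 x with h | h
  · left; rw [abs_of_nonneg (by omega), abs_of_nonneg (by omega)]; ring
  · right; rw [abs_of_nonpos (show x + 1 ≤ 0 by omega), abs_of_nonpos (show x ≤ 0 by omega)]; ring

lemma pv_cell_lt (s a b : Nat) (ha : a < s) (hb : b < s) : a * s + b < s * s := by
  have h1 : a * s + b < (a + 1) * s := by ring_nf; omega
  have h2 : (a + 1) * s ≤ s * s := Nat.mul_le_mul_right s (by omega)
  omega

lemma pv_cell_div (s a b : Nat) (hb : b < s) : (a * s + b) / s = a := by
  have h0 : 0 < s := by omega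
  rw [Nat.add_comm, Nat.add_mul_div_right _ _ h0, Nat.div_eq_of_lt hb]; omega

lemma pv_cell_mod (s a b : Nat) (hb : b < s) : (a * s + b) % s = b := by
  rw [Nat.add_comm, Nat.add_mul_mod_self_right, Nat.mod_eq_of_lt hb]

lemma pvM_mk (s k l a b : Nat) (hb : b < s) :
    pvM s k l (a * s + b) = |(a : Int) - k| + |(b : Int) - l| := by
  unfold pvM; rw [pv_cell_div s a b hb, pv_cell_mod s a b hb]

lemma pvM_nonneg (s k l t : Nat) : 0 ≤ pvM s k l t := by
  unfold pvM; positivity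

lemma pvM_decomp (s t : Nat) (h0 : 0 < s) : t = t / s * s + t % s ∧ t % s < s := by
  have h := Nat.div_add_mod t s
  refine ⟨?_, Nat.mod_lt t h0⟩
  rw [Nat.mul_comm]; omega

lemma pvM_eq_zero_iff (s k l t : Nat) (_hk : k < s) (hl : l < s) (ht : t < s * s) :
    pvM s k l t = 0 ↔ t = k * s + l := by
  have h0 : 0 < s := by omega
  obtain ⟨hdec, hmod⟩ := pvM_decomp s t h0
  constructor
  · intro h
    rw [hdec, pvM_mk s k l _ _ hmod] at h
    have hA := abs_nonneg (((t / s : Nat) : Int) - k)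
    have hB := abs_nonneg (((t % s : Nat) : Int) - l)
    have h1 : |((t / s : Nat) : Int) - k| = 0 := by omega
    have h2 : |((t % s : Nat) : Int) - l| = 0 := by omega
    rw [abs_eq_zero, sub_eq_zero] at h1 h2
    have e1 : t / s = k := by exact_mod_cast h1
    have e2 : t % s = l := by exact_mod_cast h2
    rw [e1, e2] at hdec; exact hdec
  · intro h
    subst h
    rw [pvM_mk s k l _ _ hl]; simp

-- distances from the centre of the offset grid of side 2s-1 never exceed 2s-2
lemma pvM_centre_le (s t : Nat) (hs : 1 ≤ s) (ht : t < (2 * s - 1) * (2 * s - 1)) :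
    pvM (2 * s - 1) (s - 1) (s - 1) t ≤ 2 * (s : Int) - 2 := by
  have h0 : 0 < 2 * s - 1 := by omega
  obtain ⟨hdec, hmod⟩ := pvM_decomp (2 * s - 1) t h0
  have hdiv : t / (2 * s - 1) < 2 * s - 1 := (Nat.div_lt_iff_lt_mul h0).mpr ht
  conv_lhs => rw [hdec]
  rw [pvM_mk (2 * s - 1) (s - 1) (s - 1) _ _ hmod]
  generalize t / (2 * s - 1) = a at hdiv ⊢
  generalize t % (2 * s - 1) = b at hmod ⊢
  have h1 : |(a : Int) - ((s - 1 : Nat) : Int)| ≤ (s : Int) - 1 := abs_le.mpr ⟨by omega, by omega⟩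
  have h2 : |(b : Int) - ((s - 1 : Nat) : Int)| ≤ (s : Int) - 1 := abs_le.mpr ⟨by omega, by omega⟩
  omega

-- every cell at positive distance has an in-grid neighbour one step closer to the source
lemma pv_descent (s k l t : Nat) (hk : k < s) (hl : l < s) (ht : t < s * s)
    (h1 : 1 ≤ pvM s k l t) :
    ∃ u : Nat, u < s * s ∧ pvM s k l u = pvM s k l t - 1 ∧
      ((((t / s : Nat)) : Int), (((t % s : Nat)) : Int)) ∈
        pvNbrs (((u / s : Nat)) : Int) (((u % s : Nat)) : Int) := by
  have h0 : 0 < s := by omega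
  obtain ⟨hdec, hmod⟩ := pvM_decomp s t h0
  have hdiv : t / s < s := (Nat.div_lt_iff_lt_mul h0).mpr ht
  set ti := t / s with hti
  set tj := t % s with htj
  have hM : pvM s k l t = |(ti : Int) - k| + |(tj : Int) - l| := by
    conv_lhs => rw [hdec]
    exact pvM_mk s k l ti tj hmod
  rcases Nat.lt_trichotomy k ti with hc | hc | hc
  · -- move one row up, towards the source
    refine ⟨(ti - 1) * s + tj, pv_cell_lt s _ _ (by omega) hmod, ?_, ?_⟩
    · rw [pvM_mk s k l _ _ hmod, hM]
      have e : ((ti - 1 : Nat) : Int) = (ti : Int) - 1 := by omega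
      have a1 : |(ti : Int) - 1 - k| = |(ti : Int) - k| - 1 := by
        rw [abs_of_nonneg (by omega), abs_of_nonneg (by omega)]; ring
      rw [e]; omega
    · rw [pv_cell_div s _ _ hmod, pv_cell_mod s _ _ hmod]
      simp only [pvNbrs, List.mem_cons, List.not_mem_nil, or_false]
      refine Or.inr (Or.inl ?_)
      exact Prod.ext_iff.mpr ⟨by omega, rfl⟩
  · -- same row: move within the row, towards the source column
    have htjl : tj ≠ l := by
      intro he
      rw [hM, hc, he] at h1; simp at h1
    rcases Nat.lt_or_ge l tj with hc2 | hc2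
    · refine ⟨ti * s + (tj - 1), pv_cell_lt s _ _ hdiv (by omega), ?_, ?_⟩
      · rw [pvM_mk s k l _ _ (by omega), hM]
        have e : ((tj - 1 : Nat) : Int) = (tj : Int) - 1 := by omega
        have a1 : |(tj : Int) - 1 - l| = |(tj : Int) - l| - 1 := by
          rw [abs_of_nonneg (by omega), abs_of_nonneg (by omega)]; ring
        rw [e]; omega
      · rw [pv_cell_div s _ _ (by omega), pv_cell_mod s _ _ (by omega)]
        simp only [pvNbrs, List.mem_cons, List.not_mem_nil, or_false]
        refine Or.inr (Or.inr (Or.inr ?_))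
        exact Prod.ext_iff.mpr ⟨rfl, by omega⟩
    · have hc3 : tj < l := by omega
      refine ⟨ti * s + (tj + 1), pv_cell_lt s _ _ hdiv (by omega), ?_, ?_⟩
      · rw [pvM_mk s k l _ _ (by omega), hM]
        have a1 : |(tj : Int) + 1 - l| = |(tj : Int) - l| - 1 := by
          rw [abs_of_nonpos (by omega), abs_of_nonpos (by omega)]; ring
        push_cast
        omega
      · rw [pv_cell_div s _ _ (by omega), pv_cell_mod s _ _ (by omega)]
        simp only [pvNbrs, List.mem_cons, List.not_mem_nil, or_false]
        refine Or.inr (Or.inr (Or.inl ?_))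
        exact Prod.ext_iff.mpr ⟨rfl, by omega⟩
  · -- move one row down, towards the source
    have hts : ti + 1 < s := by omega
    refine ⟨(ti + 1) * s + tj, pv_cell_lt s _ _ hts hmod, ?_, ?_⟩
    · rw [pvM_mk s k l _ _ hmod, hM]
      have a1 : |(ti : Int) + 1 - k| = |(ti : Int) - k| - 1 := by
        rw [abs_of_nonpos (by omega), abs_of_nonpos (by omega)]; ring
      push_cast
      omega
    · rw [pv_cell_div s _ _ hmod, pv_cell_mod s _ _ hmod]
      simp only [pvNbrs, List.mem_cons, List.not_mem_nil, or_false]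
      refine Or.inl ?_
      exact Prod.ext_iff.mpr ⟨by omega, rfl⟩

-- ----- the BFS level invariant -----

lemma pv_visit (s k l : Nat) (d : Int) (hd : 1 ≤ d) (st : List Int × List Int)
    (hJ : pvJ s k l d st) (p : Int × Int)
    (hadj : (0 ≤ p.1 ∧ p.1 < (s : Int) ∧ 0 ≤ p.2 ∧ p.2 < (s : Int)) →
      pvM s k l ((p.1 * s + p.2).toNat) = d ∨ pvM s k l ((p.1 * s + p.2).toNat) ≤ d - 1) :
    pvJ s k l d (pvVisit (s : Int) d st p) ∧
    (∀ x ∈ st.2, x ∈ (pvVisit (s : Int) d st p).2) ∧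
    ((0 ≤ p.1 ∧ p.1 < (s : Int) ∧ 0 ≤ p.2 ∧ p.2 < (s : Int)) →
      pvM s k l ((p.1 * s + p.2).toNat) = d → (p.1 * s + p.2) ∈ (pvVisit (s : Int) d st p).2) := by
  obtain ⟨hlen, hchar, hsound⟩ := hJ
  by_cases hb : 0 ≤ p.1 ∧ p.1 < (s : Int) ∧ 0 ≤ p.2 ∧ p.2 < (s : Int)
  case neg =>
    rw [pvVisit, if_neg hb]
    exact ⟨⟨hlen, hchar, hsound⟩, fun x hx => hx, fun h => absurd h hb⟩
  case pos =>
    obtain ⟨hb1, hb2, hb3, hb4⟩ := hb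
    have hsnn : (0 : Int) ≤ (s : Int) := Int.natCast_nonneg s
    have hqnn : 0 ≤ p.1 * (s : Int) + p.2 := by
      have := mul_nonneg hb1 hsnn; omega
    have hqe : (((p.1 * (s : Int) + p.2).toNat : Nat) : Int) = p.1 * (s : Int) + p.2 :=
      Int.toNat_of_nonneg hqnn
    set q : Nat := (p.1 * (s : Int) + p.2).toNat with hqdef
    have hqlt : q < s * s := by
      have h5 : p.1 * (s : Int) ≤ ((s : Int) - 1) * s :=
        mul_le_mul_of_nonneg_right (by omega) hsnn
      have h6 : ((s : Int) - 1) * s + s = (s : Int) * s := by ring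
      have h7 : ((q : Nat) : Int) < ((s * s : Nat) : Int) := by push_cast; omega
      exact_mod_cast h7
    have hval : st.1.getD q 0 =
        (if pvM s k l q ≤ d - 1 then pvM s k l q
         else if (q : Int) ∈ st.2 then d else -1) := by
      rw [List.getD_eq_getElem?_getD, hchar q hqlt]; rfl
    have hM0 := pvM_nonneg s k l q
    rw [pvVisit, if_pos ⟨hb1, hb2, hb3, hb4⟩, ← hqe]
    simp only [PySem.List.pyGetD_natCast, PySem.List.pySetD_natCast]
    by_cases hw : st.1.getD q 0 = -1
    · -- unvisited: write d and enqueue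
      rw [if_pos hw]
      rw [hval] at hw
      have hnear : ¬ pvM s k l q ≤ d - 1 ∧ (q : Int) ∉ st.2 := by
        split_ifs at hw with h1 h2
        · omega
        · omega
        · exact ⟨h1, h2⟩
      have hmq : pvM s k l q = d := by
        rcases hadj ⟨hb1, hb2, hb3, hb4⟩ with h | h
        · exact h
        · exact absurd h hnear.1
      refine ⟨⟨?_, ?_, ?_⟩, ?_, ?_⟩
      · simpa using hlen
      · intro t ht
        by_cases htq : t = q
        · subst htq
          rw [List.getElem?_set_self (by omega)]
          rw [if_neg hnear.1, if_pos (by simp)]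
        · rw [List.getElem?_set_ne (fun h => htq h.symm), hchar t ht]
          have hne : ¬ ((t : Int) = (q : Int)) := fun h => htq (by exact_mod_cast h)
          simp only [List.mem_append, List.mem_singleton, hne, or_false]
      · intro x hx
        rcases List.mem_append.mp hx with h | h
        · exact hsound x h
        · refine ⟨q, hqlt, List.mem_singleton.mp h, hmq⟩
      · intro x hx; exact List.mem_append_left _ hx
      · intro _ _; exact List.mem_append_right _ (List.mem_singleton.mpr rfl)
    · -- already visited: state unchanged
      rw [if_neg hw]
      refine ⟨⟨hlen, hchar, hsound⟩, fun x hx => hx, fun _ hmq => ?_⟩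
      rw [hval] at hw
      rw [hmq] at hw
      split_ifs at hw with h1 h2
      · omega
      · exact h2
      · omega

lemma pvM_nbr (s k l u : Nat) (_hk : k < s) (_hl : l < s) (hu : u < s * s) (p : Int × Int)
    (hp : p ∈ pvNbrs (((u / s : Nat)) : Int) (((u % s : Nat)) : Int))
    (hb : 0 ≤ p.1 ∧ p.1 < (s : Int) ∧ 0 ≤ p.2 ∧ p.2 < (s : Int)) :
    pvM s k l ((p.1 * s + p.2).toNat) = pvM s k l u + 1 ∨
    pvM s k l ((p.1 * s + p.2).toNat) = pvM s k l u - 1 := by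
  have h0 : 0 < s := by omega
  obtain ⟨hdec, hmod⟩ := pvM_decomp s u h0
  have hdiv : u / s < s := (Nat.div_lt_iff_lt_mul h0).mpr hu
  set ui := u / s with hui
  set uj := u % s with huj
  have hMu : pvM s k l u = |(ui : Int) - k| + |(uj : Int) - l| := by
    conv_lhs => rw [hdec]
    exact pvM_mk s k l ui uj hmod
  simp only [pvNbrs, List.mem_cons, List.not_mem_nil, or_false] at hp
  obtain ⟨hb1, hb2, hb3, hb4⟩ := hb
  rcases hp with hp | hp | hp | hp <;> subst hp <;> dsimp only at hb1 hb2 hb3 hb4 ⊢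
  · -- (ui - 1, uj)
    have h1 : 1 ≤ ui := by omega
    have hcast : ((ui - 1 : Nat) : Int) = (ui : Int) - 1 := by omega
    have hc : (((ui - 1) * s + uj : Nat) : Int) = ((ui : Int) - 1) * s + uj := by
      rw [Nat.cast_add, Nat.cast_mul, hcast]
    have hcell : (((ui : Int) - 1) * (s : Int) + (uj : Int)).toNat = (ui - 1) * s + uj := by
      rw [← hc, Int.toNat_natCast]
    rw [hcell, pvM_mk s k l _ _ hmod, hMu, hcast]
    have ha := pv_abs_sub_one ((ui : Int) - k)
    rw [show ((ui : Int) - 1 - k) = ((ui : Int) - k - 1) from by ring]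
    omega
  · -- (ui + 1, uj)
    have h1 : ui + 1 < s := by omega
    have hc : (((ui + 1) * s + uj : Nat) : Int) = ((ui : Int) + 1) * s + uj := by push_cast; ring
    have hcell : (((ui : Int) + 1) * (s : Int) + (uj : Int)).toNat = (ui + 1) * s + uj := by
      rw [← hc, Int.toNat_natCast]
    rw [hcell, pvM_mk s k l _ _ hmod, hMu]
    have ha := pv_abs_add_one ((ui : Int) - k)
    rw [show (((ui + 1 : Nat) : Int) - k) = ((ui : Int) - k + 1) from by push_cast; ring]
    omega
  · -- (ui, uj - 1)
    have h1 : 1 ≤ uj := by omega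
    have hcast : ((uj - 1 : Nat) : Int) = (uj : Int) - 1 := by omega
    have hc : ((ui * s + (uj - 1) : Nat) : Int) = (ui : Int) * s + ((uj : Int) - 1) := by
      rw [Nat.cast_add, Nat.cast_mul, hcast]
    have hcell : ((ui : Int) * (s : Int) + ((uj : Int) - 1)).toNat = ui * s + (uj - 1) := by
      rw [← hc, Int.toNat_natCast]
    rw [hcell, pvM_mk s k l _ _ (by omega), hMu, hcast]
    have ha := pv_abs_sub_one ((uj : Int) - l)
    rw [show ((uj : Int) - 1 - l) = ((uj : Int) - l - 1) from by ring]
    omega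
  · -- (ui, uj + 1)
    have h1 : uj + 1 < s := by omega
    have hc : ((ui * s + (uj + 1) : Nat) : Int) = (ui : Int) * s + ((uj : Int) + 1) := by
      push_cast; ring
    have hcell : ((ui : Int) * (s : Int) + ((uj : Int) + 1)).toNat = ui * s + (uj + 1) := by
      rw [← hc, Int.toNat_natCast]
    rw [hcell, pvM_mk s k l _ _ (by omega), hMu]
    have ha := pv_abs_add_one ((uj : Int) - l)
    rw [show (((uj + 1 : Nat) : Int) - l) = ((uj : Int) - l + 1) from by push_cast; ring]
    omega

lemma pv_bfsStep (s k l : Nat) (d : Int) (hd : 1 ≤ d) (hk : k < s) (hl : l < s)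
    (st : List Int × List Int) (hJ : pvJ s k l d st) (u : Nat) (hu : u < s * s)
    (hmu : pvM s k l u = d - 1) :
    pvJ s k l d (bfsStep (s : Int) d st (u : Int)) ∧
    (∀ x ∈ st.2, x ∈ (bfsStep (s : Int) d st (u : Int)).2) ∧
    (∀ t : Nat, t < s * s → pvM s k l t = d →
      ((((t / s : Nat)) : Int), (((t % s : Nat)) : Int)) ∈
        pvNbrs (((u / s : Nat)) : Int) (((u % s : Nat)) : Int) →
      (t : Int) ∈ (bfsStep (s : Int) d st (u : Int)).2) := by
  have h0 : 0 < s := by omega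
  have hadj : ∀ p ∈ pvNbrs (((u / s : Nat)) : Int) (((u % s : Nat)) : Int),
      (0 ≤ p.1 ∧ p.1 < (s : Int) ∧ 0 ≤ p.2 ∧ p.2 < (s : Int)) →
      pvM s k l ((p.1 * s + p.2).toNat) = d ∨ pvM s k l ((p.1 * s + p.2).toNat) ≤ d - 1 := by
    intro p hp hbb
    rcases pvM_nbr s k l u hk hl hu p hp hbb with h | h
    · left; omega
    · right; omega
  have hstep : bfsStep (s : Int) d st (u : Int) =
      (pvNbrs (((u / s : Nat)) : Int) (((u % s : Nat)) : Int)).foldl (pvVisit (s : Int) d) st := by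
    simp [bfsStep]
  have hmem1 : ((((u / s : Nat)) : Int) - 1, (((u % s : Nat)) : Int)) ∈
      pvNbrs (((u / s : Nat)) : Int) (((u % s : Nat)) : Int) := by simp [pvNbrs]
  have hmem2 : ((((u / s : Nat)) : Int) + 1, (((u % s : Nat)) : Int)) ∈
      pvNbrs (((u / s : Nat)) : Int) (((u % s : Nat)) : Int) := by simp [pvNbrs]
  have hmem3 : ((((u / s : Nat)) : Int), (((u % s : Nat)) : Int) - 1) ∈
      pvNbrs (((u / s : Nat)) : Int) (((u % s : Nat)) : Int) := by simp [pvNbrs]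
  have hmem4 : ((((u / s : Nat)) : Int), (((u % s : Nat)) : Int) + 1) ∈
      pvNbrs (((u / s : Nat)) : Int) (((u % s : Nat)) : Int) := by simp [pvNbrs]
  have h1 := pv_visit s k l d hd st hJ _ (hadj _ hmem1)
  have h2 := pv_visit s k l d hd _ h1.1 _ (hadj _ hmem2)
  have h3 := pv_visit s k l d hd _ h2.1 _ (hadj _ hmem3)
  have h4 := pv_visit s k l d hd _ h3.1 _ (hadj _ hmem4)
  have hfold : (pvNbrs (((u / s : Nat)) : Int) (((u % s : Nat)) : Int)).foldl
      (pvVisit (s : Int) d) st =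
      pvVisit (s : Int) d (pvVisit (s : Int) d (pvVisit (s : Int) d (pvVisit (s : Int) d st
        ((((u / s : Nat)) : Int) - 1, (((u % s : Nat)) : Int)))
        ((((u / s : Nat)) : Int) + 1, (((u % s : Nat)) : Int)))
        ((((u / s : Nat)) : Int), (((u % s : Nat)) : Int) - 1))
        ((((u / s : Nat)) : Int), (((u % s : Nat)) : Int) + 1) := by
    simp [pvNbrs]
  rw [hstep, hfold]
  refine ⟨h4.1, ?_, ?_⟩
  · intro x hx
    exact h4.2.1 _ (h3.2.1 _ (h2.2.1 _ (h1.2.1 _ hx)))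
  · intro t ht hmt hmem
    obtain ⟨hdect, hmodt⟩ := pvM_decomp s t h0
    have hdivt : t / s < s := (Nat.div_lt_iff_lt_mul h0).mpr ht
    have hdivu : u / s < s := (Nat.div_lt_iff_lt_mul h0).mpr hu
    have hmodu : u % s < s := Nat.mod_lt u h0
    have hvalP : (((t / s : Nat)) : Int) * (s : Int) + (((t % s : Nat)) : Int) = (t : Int) := by
      rw [← Nat.cast_mul, ← Nat.cast_add, ← hdect]
    clear hstep hfold hadj hdect hJ hu hmu
    simp only [pvNbrs, List.mem_cons, List.not_mem_nil, or_false] at hmem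
    generalize hg1 : u / s = ua at *
    generalize hg2 : u % s = ub at *
    generalize hg3 : t / s = ta at *
    generalize hg4 : t % s = tb at *
    rcases hmem with he | he | he | he
    · have he1 : ((ta : Nat) : Int) = ((ua : Nat) : Int) - 1 := by
        have := congrArg Prod.fst he; simpa using this
      have he2 : ((tb : Nat) : Int) = ((ub : Nat) : Int) := by
        have := congrArg Prod.snd he; simpa using this
      rw [he1, he2] at hvalP
      have hb' : (0 : Int) ≤ ((ua : Nat) : Int) - 1 ∧ ((ua : Nat) : Int) - 1 < (s : Int) ∧
          (0 : Int) ≤ ((ub : Nat) : Int) ∧ ((ub : Nat) : Int) < (s : Int) :=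
        ⟨by omega, by omega, by omega, by omega⟩
      have hx := h1.2.2 hb'
        (by rw [hvalP, Int.toNat_natCast]; exact hmt)
      rw [hvalP] at hx
      exact h4.2.1 _ (h3.2.1 _ (h2.2.1 _ hx))
    · have he1 : ((ta : Nat) : Int) = ((ua : Nat) : Int) + 1 := by
        have := congrArg Prod.fst he; simpa using this
      have he2 : ((tb : Nat) : Int) = ((ub : Nat) : Int) := by
        have := congrArg Prod.snd he; simpa using this
      rw [he1, he2] at hvalP
      have hb' : (0 : Int) ≤ ((ua : Nat) : Int) + 1 ∧ ((ua : Nat) : Int) + 1 < (s : Int) ∧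
          (0 : Int) ≤ ((ub : Nat) : Int) ∧ ((ub : Nat) : Int) < (s : Int) :=
        ⟨by omega, by omega, by omega, by omega⟩
      have hx := h2.2.2 hb'
        (by rw [hvalP, Int.toNat_natCast]; exact hmt)
      rw [hvalP] at hx
      exact h4.2.1 _ (h3.2.1 _ hx)
    · have he1 : ((ta : Nat) : Int) = ((ua : Nat) : Int) := by
        have := congrArg Prod.fst he; simpa using this
      have he2 : ((tb : Nat) : Int) = ((ub : Nat) : Int) - 1 := by
        have := congrArg Prod.snd he; simpa using this
      rw [he1, he2] at hvalP
      have hb' : (0 : Int) ≤ ((ua : Nat) : Int) ∧ ((ua : Nat) : Int) < (s : Int) ∧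
          (0 : Int) ≤ ((ub : Nat) : Int) - 1 ∧ ((ub : Nat) : Int) - 1 < (s : Int) :=
        ⟨by omega, by omega, by omega, by omega⟩
      have hx := h3.2.2 hb'
        (by rw [hvalP, Int.toNat_natCast]; exact hmt)
      rw [hvalP] at hx
      exact h4.2.1 _ hx
    · have he1 : ((ta : Nat) : Int) = ((ua : Nat) : Int) := by
        have := congrArg Prod.fst he; simpa using this
      have he2 : ((tb : Nat) : Int) = ((ub : Nat) : Int) + 1 := by
        have := congrArg Prod.snd he; simpa using this
      rw [he1, he2] at hvalP
      have hb' : (0 : Int) ≤ ((ua : Nat) : Int) ∧ ((ua : Nat) : Int) < (s : Int) ∧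
          (0 : Int) ≤ ((ub : Nat) : Int) + 1 ∧ ((ub : Nat) : Int) + 1 < (s : Int) :=
        ⟨by omega, by omega, by omega, by omega⟩
      have hx := h4.2.2 hb'
        (by rw [hvalP, Int.toNat_natCast]; exact hmt)
      rw [hvalP] at hx
      exact hx

lemma pv_fold_frontier (s k l : Nat) (hk : k < s) (hl : l < s) (d : Int) (hd : 1 ≤ d)
    (F : List Int) :
    ∀ st : List Int × List Int, pvJ s k l d st →
    (∀ x ∈ F, ∃ u : Nat, u < s * s ∧ x = (u : Int) ∧ pvM s k l u = d - 1) →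
    pvJ s k l d (F.foldl (bfsStep (s : Int) d) st) ∧
    (∀ x ∈ st.2, x ∈ (F.foldl (bfsStep (s : Int) d) st).2) ∧
    (∀ u : Nat, (u : Int) ∈ F → ∀ t : Nat, t < s * s → pvM s k l t = d →
      ((((t / s : Nat)) : Int), (((t % s : Nat)) : Int)) ∈
        pvNbrs (((u / s : Nat)) : Int) (((u % s : Nat)) : Int) →
      (t : Int) ∈ (F.foldl (bfsStep (s : Int) d) st).2) := by
  induction F with
  | nil =>
    intro st hJ _
    exact ⟨hJ, fun x hx => hx, fun u hu => absurd hu (List.not_mem_nil)⟩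
  | cons c F ih =>
    intro st hJ hFs
    obtain ⟨u0, hu0, hceq, hmu0⟩ := hFs c List.mem_cons_self
    subst hceq
    have hstep := pv_bfsStep s k l d hd hk hl st hJ u0 hu0 hmu0
    have hrec := ih (bfsStep (s : Int) d st (u0 : Int)) hstep.1
      (fun x hx => hFs x (List.mem_cons_of_mem _ hx))
    simp only [List.foldl_cons]
    refine ⟨hrec.1, ?_, ?_⟩
    · intro x hx
      exact hrec.2.1 x (hstep.2.1 x hx)
    · intro u hmemu t ht hmt hadj
      rcases List.mem_cons.mp hmemu with he | he
      · have heq : u = u0 := by exact_mod_cast he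
        subst heq
        exact hrec.2.1 _ (hstep.2.2 t ht hmt hadj)
      · exact hrec.2.2 u he t ht hmt hadj

-- one whole level: dist final below d-1 and frontier = level d-1 gives dist final below d
-- and new frontier = level d
lemma pv_level (s k l : Nat) (hk : k < s) (hl : l < s) (d : Int) (hd : 1 ≤ d)
    (dist : List Int) (F : List Int) (hPhi : pvPhi s k l (d - 1) dist)
    (hFs : ∀ x ∈ F, ∃ u : Nat, u < s * s ∧ x = (u : Int) ∧ pvM s k l u = d - 1)
    (hFc : ∀ u : Nat, u < s * s → pvM s k l u = d - 1 → (u : Int) ∈ F) :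
    pvPhi s k l d (F.foldl (bfsStep (s : Int) d) (dist, [])).1 ∧
    (∀ x ∈ (F.foldl (bfsStep (s : Int) d) (dist, [])).2,
      ∃ u : Nat, u < s * s ∧ x = (u : Int) ∧ pvM s k l u = d) ∧
    (∀ u : Nat, u < s * s → pvM s k l u = d →
      (u : Int) ∈ (F.foldl (bfsStep (s : Int) d) (dist, [])).2) := by
  have hJ0 : pvJ s k l d (dist, []) := by
    refine ⟨hPhi.1, ?_, ?_⟩
    · intro t ht
      rw [hPhi.2 t ht]
      simp only [List.not_mem_nil, if_false]
    · intro x hx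
      exact absurd hx (List.not_mem_nil)
  have hmain := pv_fold_frontier s k l hk hl d hd F (dist, []) hJ0 hFs
  have hcomp : ∀ t : Nat, t < s * s → pvM s k l t = d →
      (t : Int) ∈ (F.foldl (bfsStep (s : Int) d) (dist, [])).2 := by
    intro t ht hmt
    obtain ⟨u, hu, hmu, hadj⟩ := pv_descent s k l t hk hl ht (by omega)
    exact hmain.2.2 u (hFc u hu (by omega)) t ht hmt hadj
  refine ⟨⟨hmain.1.1, ?_⟩, hmain.1.2.2, hcomp⟩
  intro t ht
  rw [hmain.1.2.1 t ht]
  have hm0 := pvM_nonneg s k l t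
  by_cases hle : pvM s k l t ≤ d - 1
  · rw [if_pos hle, if_pos (by omega)]
  · by_cases heq : pvM s k l t = d
    · rw [if_neg hle, if_pos (hcomp t ht heq), if_pos (by omega), heq]
    · have hnm : (t : Int) ∉ (F.foldl (bfsStep (s : Int) d) (dist, [])).2 := by
        intro hmem
        obtain ⟨u', hu', hequ, hmu'⟩ := hmain.1.2.2 _ hmem
        have heqt : t = u' := by exact_mod_cast hequ
        exact heq (by rw [heqt]; exact hmu')
      rw [if_neg hle, if_neg hnm, if_neg (by omega)]

-- the outer level loop, by induction on the number of levels run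
lemma pv_levels (s k l : Nat) (hk : k < s) (hl : l < s) (D : Nat) :
    pvPhi s k l D
      ((PySem.List.pyRange 1 (1 + (D : Int)) 1).foldl
        (fun st d => st.2.foldl (bfsStep (s : Int) d) (st.1, []))
        ((List.replicate (s * s) (-1 : Int)).set (k * s + l) 0, [((k * s + l : Nat) : Int)])).1 ∧
    (∀ x ∈ ((PySem.List.pyRange 1 (1 + (D : Int)) 1).foldl
        (fun st d => st.2.foldl (bfsStep (s : Int) d) (st.1, []))
        ((List.replicate (s * s) (-1 : Int)).set (k * s + l) 0, [((k * s + l : Nat) : Int)])).2,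
      ∃ u : Nat, u < s * s ∧ x = (u : Int) ∧ pvM s k l u = D) ∧
    (∀ u : Nat, u < s * s → pvM s k l u = D →
      (u : Int) ∈ ((PySem.List.pyRange 1 (1 + (D : Int)) 1).foldl
        (fun st d => st.2.foldl (bfsStep (s : Int) d) (st.1, []))
        ((List.replicate (s * s) (-1 : Int)).set (k * s + l) 0, [((k * s + l : Nat) : Int)])).2) := by
  have hsrc : k * s + l < s * s := pv_cell_lt s k l hk hl
  induction D with
  | zero =>
    rw [show (1 + ((0 : Nat) : Int)) = 1 by norm_num, PySem.List.pyRange_one_eq_nil (by omega)]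
    simp only [List.foldl_nil, Nat.cast_zero]
    refine ⟨⟨by simp, ?_⟩, ?_, ?_⟩
    · intro t ht
      by_cases hts : t = k * s + l
      · subst hts
        rw [List.getElem?_set_self (by simpa using hsrc)]
        have hm0 : pvM s k l (k * s + l) = 0 := (pvM_eq_zero_iff s k l _ hk hl hsrc).mpr rfl
        rw [hm0, if_pos (by omega)]
      · rw [List.getElem?_set_ne (fun h => hts h.symm), List.getElem?_replicate_of_lt ht]
        have hm0 := pvM_nonneg s k l t
        have hmne : pvM s k l t ≠ 0 := fun h => hts ((pvM_eq_zero_iff s k l t hk hl ht).mp h)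
        rw [if_neg (by omega)]
    · intro x hx
      refine ⟨k * s + l, hsrc, List.mem_singleton.mp hx, ?_⟩
      exact (pvM_eq_zero_iff s k l _ hk hl hsrc).mpr rfl
    · intro u hu hmu
      have : u = k * s + l := (pvM_eq_zero_iff s k l u hk hl hu).mp hmu
      subst this
      exact List.mem_singleton.mpr rfl
  | succ D ih =>
    have hsplit : PySem.List.pyRange 1 (1 + ((D + 1 : Nat) : Int)) 1 =
        PySem.List.pyRange 1 (1 + (D : Int)) 1 ++ [1 + (D : Int)] := by
      rw [show (1 + ((D + 1 : Nat) : Int)) = (1 + (D : Int)) + 1 by push_cast; ring]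
      exact PySem.List.pyRange_one_succ_right (by omega)
    rw [hsplit, List.foldl_append]
    simp only [List.foldl_cons, List.foldl_nil]
    obtain ⟨hPhi, hFs, hFc⟩ := ih
    have hPhi' : pvPhi s k l ((1 + (D : Int)) - 1)
        ((PySem.List.pyRange 1 (1 + (D : Int)) 1).foldl
          (fun st d => st.2.foldl (bfsStep (s : Int) d) (st.1, []))
          ((List.replicate (s * s) (-1 : Int)).set (k * s + l) 0,
           [((k * s + l : Nat) : Int)])).1 := by
      rw [show (1 + (D : Int)) - 1 = (D : Int) by ring]
      exact hPhi
    have hlev := pv_level s k l hk hl (1 + (D : Int)) (by omega) _ _ hPhi'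
      (by rw [show (1 + (D : Int)) - 1 = (D : Int) by ring]; exact hFs)
      (by rw [show (1 + (D : Int)) - 1 = (D : Int) by ring]; exact hFc)
    rw [show (((D + 1 : Nat)) : Int) = 1 + (D : Int) by push_cast; ring]
    exact hlev

-- B's sliced row assembly from the central BFS field equals A's row-major comprehension
lemma pv_value_eq (s kn ln : Nat) (hk : kn < s) (hl : ln < s) :
    (PySem.List.pyRange 0 (s : Int) 1).flatMap (fun i =>
      (PySem.List.pyRange 0 (s : Int) 1).map (fun j => |i - (kn : Int)| + |j - (ln : Int)|)) =
    (PySem.List.pyRange 0 (s : Int) 1).foldl (fun row i =>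
      row ++ PySem.List.slice
        ((bfsLevels (2 * (s : Int) - 1) (2 * (s : Int) - 1)
          (PySem.List.pySetD
            (List.replicate (((2 * (s : Int) - 1) * (2 * (s : Int) - 1)).toNat) (-1 : Int))
            (((s : Int) - 1) * (2 * (s : Int) - 1) + ((s : Int) - 1)) 0,
           [((s : Int) - 1) * (2 * (s : Int) - 1) + ((s : Int) - 1)])).1)
        (some ((i - (kn : Int) + (s : Int) - 1) * (2 * (s : Int) - 1) + ((s : Int) - 1 - (ln : Int))))
        (some ((i - (kn : Int) + (s : Int) - 1) * (2 * (s : Int) - 1) + ((s : Int) - 1 - (ln : Int)) + (s : Int)))) [] := by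
  have hs1 : 1 ≤ s := by omega
  -- the offset grid side as a natural number
  have hmc : ((2 * s - 1 : Nat) : Int) = 2 * (s : Int) - 1 := by omega
  have hc1 : ((s - 1 : Nat) : Int) = (s : Int) - 1 := by omega
  have hcentre : ((s : Int) - 1) * (2 * (s : Int) - 1) + ((s : Int) - 1) =
      (((s - 1) * (2 * s - 1) + (s - 1) : Nat) : Int) := by
    rw [Nat.cast_add, Nat.cast_mul, hc1, hmc]
  have hNN : (((2 * (s : Int) - 1) * (2 * (s : Int) - 1)).toNat) = (2 * s - 1) * (2 * s - 1) := by
    rw [← hmc, ← Nat.cast_mul, Int.toNat_natCast]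
  have hD : (2 * ((s : Int)) - 1) = 1 + ((2 * s - 2 : Nat) : Int) := by omega
  have hks : s - 1 < 2 * s - 1 := by omega
  obtain ⟨hPhiLen, hPhiGet⟩ :=
    (pv_levels (2 * s - 1) (s - 1) (s - 1) hks hks (2 * s - 2)).1
  rw [PySem.List.foldl_append_eq_flatMap, List.nil_append]
  refine List.flatMap_congr ?_
  intro i hi
  obtain ⟨hi0, his⟩ := (PySem.List.mem_pyRange_one).mp hi
  obtain ⟨inat, rfl⟩ : ∃ inat : Nat, i = (inat : Int) :=
    ⟨i.toNat, (Int.toNat_of_nonneg hi0).symm⟩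
  have hinat : inat < s := by exact_mod_cast his
  -- the base index of the sliced row inside the field, as a natural number
  have hr : (((inat + s - 1 - kn : Nat)) : Int) = (inat : Int) - kn + (s : Int) - 1 := by omega
  have hx0 : (((s - 1 - ln : Nat)) : Int) = (s : Int) - 1 - (ln : Int) := by omega
  have hbase : ((inat : Int) - kn + (s : Int) - 1) * (2 * (s : Int) - 1) + ((s : Int) - 1 - (ln : Int)) =
      ((((inat + s - 1 - kn) * (2 * s - 1) + (s - 1 - ln) : Nat)) : Int) := by
    rw [Nat.cast_add, Nat.cast_mul, hr, hx0, hmc]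
  rw [hbase]
  -- identify the goal's BFS field with the fold term of pv_levels
  have hfield : (bfsLevels (2 * (s : Int) - 1) (2 * (s : Int) - 1)
      (PySem.List.pySetD
        (List.replicate (((2 * (s : Int) - 1) * (2 * (s : Int) - 1)).toNat) (-1 : Int))
        (((s : Int) - 1) * (2 * (s : Int) - 1) + ((s : Int) - 1)) 0,
       [((s : Int) - 1) * (2 * (s : Int) - 1) + ((s : Int) - 1)])).1 =
      ((PySem.List.pyRange 1 (1 + ((2 * s - 2 : Nat) : Int)) 1).foldl
        (fun st d => st.2.foldl (bfsStep ((2 * s - 1 : Nat) : Int) d) (st.1, []))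
        ((List.replicate ((2 * s - 1) * (2 * s - 1)) (-1 : Int)).set
          ((s - 1) * (2 * s - 1) + (s - 1)) 0,
         [(((s - 1) * (2 * s - 1) + (s - 1) : Nat) : Int)])).1 := by
    simp only [bfsLevels]
    rw [hcentre, hNN, PySem.List.pySetD_natCast, ← hmc]
    rw [show PySem.List.pyRange 1 (((2 * s - 1 : Nat)) : Int) 1 =
        PySem.List.pyRange 1 (1 + ((2 * s - 2 : Nat) : Int)) 1 from by
      rw [show (((2 * s - 1 : Nat)) : Int) = 1 + ((2 * s - 2 : Nat) : Int) from by omega]]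
  rw [hfield]
  rw [PySem.List.slice_natCast_add]
  -- bounds for the base row and column
  have hrlt : inat + s - 1 - kn < 2 * s - 1 := by omega
  have hx0lt : s - 1 - ln < 2 * s - 1 := by omega
  have hroom : (inat + s - 1 - kn) * (2 * s - 1) + (s - 1 - ln) + s ≤ (2 * s - 1) * (2 * s - 1) := by
    have h1 : (inat + s - 1 - kn) * (2 * s - 1) ≤ (2 * s - 2) * (2 * s - 1) :=
      Nat.mul_le_mul_right _ (by omega)
    have h2 : (2 * s - 2 + 1) * (2 * s - 1) = (2 * s - 2) * (2 * s - 1) + (2 * s - 1) :=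
      Nat.succ_mul _ _
    rw [show 2 * s - 2 + 1 = 2 * s - 1 from by omega] at h2
    omega
  apply List.ext_getElem?
  intro n
  by_cases hn : n < s
  · rw [List.getElem?_take_of_lt hn, List.getElem?_drop,
        PySem.List.getElem?_map_pyRange_zero _ s n hn]
    have hidx : (inat + s - 1 - kn) * (2 * s - 1) + (s - 1 - ln) + n < (2 * s - 1) * (2 * s - 1) := by
      omega
    rw [hPhiGet _ hidx]
    have hle := pvM_centre_le s _ hs1 hidx
    rw [if_pos (by omega)]
    -- evaluate the Manhattan field at the offset cell
    have hcol : s - 1 - ln + n < 2 * s - 1 := by omega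
    have hsum : (inat + s - 1 - kn) * (2 * s - 1) + (s - 1 - ln) + n =
        (inat + s - 1 - kn) * (2 * s - 1) + (s - 1 - ln + n) := by omega
    rw [hsum, pvM_mk (2 * s - 1) (s - 1) (s - 1) _ _ hcol]
    have e1 : ((inat + s - 1 - kn : Nat) : Int) - ((s - 1 : Nat) : Int) = (inat : Int) - kn := by
      omega
    have e2 : ((s - 1 - ln + n : Nat) : Int) - ((s - 1 : Nat) : Int) = (n : Int) - ln := by
      omega
    rw [e1, e2]
  · have hlenmap : ((PySem.List.pyRange 0 ((s : Nat) : Int) 1).map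
        (fun j => |(inat : Int) - kn| + |j - (ln : Int)|)).length = s := by
      rw [List.length_map, PySem.List.length_pyRange_one]
      omega
    rw [List.getElem?_eq_none (by rw [hlenmap]; omega),
        List.getElem?_eq_none (le_trans (List.length_take_le _ _) (by omega))]

theorem distance_map_spec : Claim_equal_distance_map := by
  intro size _
  unfold Spec_distance_map
  by_cases hsz : size < 1
  · simp only [distance_map, distance_map_alt, if_pos hsz,
      PySem.List.pyRange_one_eq_nil (show size ≤ 0 by omega), List.foldl_nil]
  simp only [distance_map, distance_map_alt, if_neg hsz]
  refine congrArg PySem.Dict.items ?_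
  apply PySem.List.foldl_congr_mem
  intro acc k hk
  apply PySem.List.foldl_congr_mem
  intro acc' l hl
  obtain ⟨hk0, hks⟩ := (PySem.List.mem_pyRange_one).mp hk
  obtain ⟨hl0, hls⟩ := (PySem.List.mem_pyRange_one).mp hl
  obtain ⟨s, rfl⟩ : ∃ s : Nat, size = (s : Int) :=
    ⟨size.toNat, (Int.toNat_of_nonneg (by omega)).symm⟩
  obtain ⟨kn, rfl⟩ : ∃ kn : Nat, k = (kn : Int) :=
    ⟨k.toNat, (Int.toNat_of_nonneg hk0).symm⟩
  obtain ⟨ln, rfl⟩ : ∃ ln : Nat, l = (ln : Int) :=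
    ⟨l.toNat, (Int.toNat_of_nonneg hl0).symm⟩
  have hkn : kn < s := by exact_mod_cast hks
  have hln : ln < s := by exact_mod_cast hls
  rw [pv_value_eq s kn ln hkn hln]
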